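-- pv_equiv track=rewrite | github.com/yyyup/test_maya_addon_convert | zooInstall_2.8.1/res/maya/scripts/zootoolspro/install/packages/zoo_maya/1.7.33/zoo/libs/maya/cmds/objutils/selection.py | componentByObject
-- ===== SOURCE A (Python) =====
-- def componentByObject(componentList):
--     """From a component list, return a nested list with components sorted per object:
--
--         [pCube2.e[4], pCylinder1.e[9], pCylinder1.e[2], pCSphere[9]]
--
--     Returns:
--
--         [[pCube2.e[4]], [pCylinder1.e[9], pCylinder1.e[2]], [pCSphere[9]]]
--
--     :param componentList: A list of components, can be objects too
--     :type componentList: list(str)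
--     :return componentNestedList: a list of lists, the first list is by object name and then all components of that name
--     :rtype componentNestedList: list(list(str))
--     """
--     nameList = list()
--     componentNestedList = list()
--     for c in componentList:
--         objName = c.split(".")[0]
--         if objName not in nameList:
--             componentNestedList.append([c])
--             nameList.append(objName)
--         else:
--             index = nameList.index(objName)
--             componentNestedList[index].append(c)
--     return componentNestedList
-- ===== SOURCE B (Python) =====
-- def componentByObject(componentList):
--     """Group components into nested lists by object name, in two staged passes:
--     first pair every component with its object name and collect the distinct
--     names in order of first appearance, then build each group by one filtering
--     scan of the paired list per object name."""
--     keyed = [(c.split(".")[0], c) for c in componentList]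
--     keys = dict.fromkeys(k for k, _ in keyed)
--     return [[c for k2, c in keyed if k2 == k] for k in keys]
-- ===== Notes on version B (the rewrite author's own statement) =====
-- stated objective: simpler
-- what changed: Replaces A's single incremental pass (parallel nameList + nested-list state mutated per element via membership test and list.index) with two staged passes: pair each component with its object name and dedupe the names in first-appearance order, then build each group by a per-name filter of the paired list; no group state is maintained during iteration.
import Mathlib
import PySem

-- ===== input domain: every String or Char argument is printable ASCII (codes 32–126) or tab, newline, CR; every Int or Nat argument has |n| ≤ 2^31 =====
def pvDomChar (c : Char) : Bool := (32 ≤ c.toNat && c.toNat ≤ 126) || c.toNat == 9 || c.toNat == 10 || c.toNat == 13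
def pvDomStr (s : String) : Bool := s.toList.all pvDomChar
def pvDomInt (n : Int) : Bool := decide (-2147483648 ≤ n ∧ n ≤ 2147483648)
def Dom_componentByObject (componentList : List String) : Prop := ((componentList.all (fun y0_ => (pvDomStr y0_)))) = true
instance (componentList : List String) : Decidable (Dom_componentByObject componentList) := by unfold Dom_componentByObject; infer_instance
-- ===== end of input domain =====

-- B replaces A's single incremental pass (parallel nameList/nested-list state mutated per element)
-- with two staged passes: distinct object names in first-appearance order, then one filter per name (simpler).

-- c.split(".")[0] — split with a "." separator always returns a nonempty list, so [0] is its head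
def pvObjKey (c : String) : String := ((PySem.Str.split? c ".").getD []).headD ""

-- ===== PORT A =====
-- the loop body: state is (nameList, componentNestedList)
def pvStepA (acc : List String × List (List String)) (c : String) : List String × List (List String) :=
  let objName := pvObjKey c
  if objName ∉ acc.1 then
    (acc.1 ++ [objName], acc.2 ++ [[c]])
  else
    -- nameList.index(objName): the branch guarantees a match, so getD 0 is never the default
    let index := (PySem.List.index? acc.1 objName).getD 0
    (acc.1, acc.2.modify index (· ++ [c]))

def componentByObject (componentList : List String) : List (List String) :=
  (componentList.foldl pvStepA (([], []) : List String × List (List String))).2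

-- ===== PORT B =====
-- pass 1: pair each component with its object name; dict.fromkeys over the names
-- = first-appearance-ordered distinct list (PySem.Set);
-- pass 2: for each name, one filtering comprehension over the paired list
def componentByObject_alt (componentList : List String) : List (List String) :=
  let keyed := componentList.map (fun c => (pvObjKey c, c))
  (PySem.Set.ofList (keyed.map Prod.fst)).map
    (fun k => (keyed.filter (fun p => p.1 == k)).map Prod.snd)

-- ===== PRECONDITION & SPEC =====
def Spec_componentByObject (componentList : List String) (out : List (List String)) : Prop := out = componentByObject_alt componentList
instance (componentList : List String) (out : List (List String)) : Decidable (Spec_componentByObject componentList out) := by unfold Spec_componentByObject; infer_instance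

-- ===== CLAIM (what is proved, stated in full; the proofs are below) =====
def Claim_equal_componentByObject : Prop := ∀ (componentList : List String), Dom_componentByObject componentList → Spec_componentByObject componentList (componentByObject componentList)

-- ===== LEMMAS AND PROOFS =====

-- Modifying the i-th image under a map over nodup names, where i is the index of k,
-- is mapping with the function changed at k only.
theorem pv_map_modify_index (names : List String) (g : String → List String)
    (k : String) (f : List String → List String) (hnd : names.Nodup) (i : Nat)
    (hi : PySem.List.index? names k = some i) :
    (names.map g).modify i f = names.map (fun x => if x = k then f (g x) else g x) := by
  induction names generalizing i with
  | nil => simp [PySem.List.index?] at hi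
  | cons x xs ih =>
    by_cases hx : x = k
    · subst hx
      rw [PySem.List.index?_cons_self] at hi
      obtain rfl : (0 : Nat) = i := Option.some.inj hi
      have hk : x ∉ xs := (List.nodup_cons.mp hnd).1
      simp only [List.map_cons, List.modify_zero_cons, List.cons.injEq]
      refine ⟨by simp, (List.map_congr_left (fun y hy => by
        have : y ≠ x := fun h => hk (h ▸ hy)
        simp [this])).symm⟩
    · rw [PySem.List.index?_cons_of_ne xs hx] at hi
      obtain ⟨j, hj, rfl⟩ := Option.map_eq_some_iff.mp hi
      simp only [List.map_cons, List.modify_succ_cons, List.cons.injEq]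
      exact ⟨(if_neg hx).symm, ih (List.nodup_cons.mp hnd).2 j hj⟩

theorem pv_A_gen (l : List String) :
    ∀ (names : List String) (g : String → List String), names.Nodup →
    l.foldl pvStepA (names, names.map g)
    = (PySem.Set.update names (l.map pvObjKey),
       (PySem.Set.update names (l.map pvObjKey)).map
         (fun x => (if x ∈ names then g x else []) ++ l.filter (fun c => pvObjKey c == x))) := by
  induction l with
  | nil =>
    intro names g _
    simp only [List.foldl_nil, List.map_nil, PySem.Set.update_nil, List.filter_nil,
      List.append_nil, Prod.mk.injEq, true_and]
    exact (List.map_congr_left (fun x hx => by simp [hx])).symm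
  | cons c rest ih =>
    intro names g hnd
    rw [List.foldl_cons]
    by_cases hk : pvObjKey c ∈ names
    · -- objName already in nameList: A appends into the existing sublist
      obtain ⟨i, hi⟩ := Option.isSome_iff_exists.mp
        ((PySem.List.index?_isSome_iff names (pvObjKey c)).mpr hk)
      have h1 : pvStepA (names, names.map g) c
          = (names, names.map (fun x => if x = pvObjKey c then g x ++ [c] else g x)) := by
        simp only [pvStepA]
        rw [if_neg (by simp [hk]), hi]
        simp only [Option.getD_some]
        exact congrArg _ (pv_map_modify_index names g (pvObjKey c) (· ++ [c]) hnd i hi)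
      rw [h1, ih names _ hnd, List.map_cons, PySem.Set.update_cons, PySem.Set.add_of_mem hk]
      refine congrArg (Prod.mk _) ?_
      refine List.map_congr_left (fun x _ => ?_)
      by_cases hx : x = pvObjKey c
      · subst hx; simp [hk]
      · have hne : (pvObjKey c == x) = false := by
          simp [beq_eq_false_iff_ne]; exact fun h => hx h.symm
        simp [hx, hne]
    · -- new object name: A opens a fresh group
      have h1 : pvStepA (names, names.map g) c
          = (names ++ [pvObjKey c], names.map g ++ [[c]]) := by
        simp [pvStepA, hk]
      have h2 : names.map g ++ [[c]]
          = (names ++ [pvObjKey c]).map (fun x => if x = pvObjKey c then [c] else g x) := by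
        rw [List.map_append]
        refine congrArg₂ _ ?_ (by simp)
        exact (List.map_congr_left (fun y hy => by
          have : y ≠ pvObjKey c := fun h => hk (h ▸ hy)
          simp [this])).symm
      have hnd2 : (names ++ [pvObjKey c]).Nodup := by
        simp only [List.nodup_append, List.nodup_cons, List.not_mem_nil, not_false_iff,
          List.nodup_nil, and_true, true_and]
        refine ⟨hnd, ?_⟩
        intro a ha b hb
        simp only [List.mem_cons, List.not_mem_nil, or_false] at hb
        exact fun h => hk ((h.trans hb) ▸ ha)
      have hadd : PySem.Set.add names (pvObjKey c) = names ++ [pvObjKey c] := by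
        simp [PySem.Set.add, PySem.Set.contains]
        intro h; exact absurd h hk
      rw [h1, h2, ih (names ++ [pvObjKey c]) _ hnd2, List.map_cons, PySem.Set.update_cons, hadd]
      refine congrArg (Prod.mk _) ?_
      refine List.map_congr_left (fun x _ => ?_)
      by_cases hx : x = pvObjKey c
      · subst hx; simp [hk]
      · have hne : (pvObjKey c == x) = false := by
          simp [beq_eq_false_iff_ne]; exact fun h => hx h.symm
        simp [hx, hne]

-- ===== VERDICT (by name: the statement is the Claim_ definition above) =====
theorem componentByObject_spec : Claim_equal_componentByObject := by
  intro l _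
  unfold Spec_componentByObject componentByObject componentByObject_alt
  have h := pv_A_gen l [] (fun _ => []) List.nodup_nil
  simp only [List.map_nil] at h
  rw [h, PySem.Set.update_nil_left]
  simp only [List.map_map, Function.comp_def, List.nil_append, ite_self, List.filter_map]
  simp
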